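-- pv_equiv track=rewrite | github.com/CoinLQ/TripitakaPlatform | tasks/common.py | extract_page_line_separators
-- ===== SOURCE A (Python) =====
-- def extract_page_line_separators(text):
--     if text == '':
--         return []
--     text = text.replace('b\n', '')
--     separators = []
--     pos = 0
--     for c in text:
--         if c in 'p\n':
--             separators.append( (pos, c) )
--         else:
--             pos += 1
--     return separators
-- ===== SOURCE B (Python) =====
-- def extract_page_line_separators(text):
--     if text == '':
--         return []
--     t = text.replace('b\n', '')
--     hits = [(i, c) for i, c in enumerate(t) if c in 'p\n']
--     return [(i - k, c) for k, (i, c) in enumerate(hits)]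
-- ===== Notes on version B (the rewrite author's own statement) =====
-- stated objective: alternative
-- what changed: Instead of threading a mutable content-position counter through the character loop, B collects the absolute indices of separator characters with enumerate and recovers each content position in closed form as index minus rank (i - k), since exactly k separators precede the k-th one.
import Mathlib
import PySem

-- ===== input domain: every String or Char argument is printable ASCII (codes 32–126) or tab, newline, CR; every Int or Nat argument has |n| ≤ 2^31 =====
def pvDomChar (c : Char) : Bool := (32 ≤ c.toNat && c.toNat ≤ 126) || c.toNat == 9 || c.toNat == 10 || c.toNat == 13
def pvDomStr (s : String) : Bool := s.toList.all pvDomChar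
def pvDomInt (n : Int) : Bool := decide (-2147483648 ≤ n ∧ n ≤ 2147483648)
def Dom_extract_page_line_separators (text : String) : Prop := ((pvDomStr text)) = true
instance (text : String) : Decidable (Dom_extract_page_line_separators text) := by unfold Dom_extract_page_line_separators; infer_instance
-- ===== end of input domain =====

-- B replaces A's running content-position counter by a closed form: it collects the
-- separator characters with their absolute indices and returns (index - rank, char);
-- objective: alternative decomposition (same O(n) cost).

-- ===== PORT A =====
def extract_page_line_separators (text : String) : List (Int × String) :=
  if text = "" then []
  else
    let t := PySem.Str.replace text "b\n" ""
    (t.toList.foldl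
      (fun st c =>
        if c == 'p' || c == '\n' then (st.1 ++ [(st.2, String.ofList [c])], st.2)
        else (st.1, st.2 + 1))
      (([], 0) : List (Int × String) × Int)).1

-- ===== PORT B =====
def extract_page_line_separators_alt (text : String) : List (Int × String) :=
  if text = "" then []
  else
    let t := PySem.Str.replace text "b\n" ""
    let hits := (PySem.List.enumerate t.toList).filter (fun ic => ic.2 == 'p' || ic.2 == '\n')
    (PySem.List.enumerate hits).map (fun ki => (ki.2.1 - ki.1, String.ofList [ki.2.2]))

-- ===== PRECONDITION & SPEC =====
def Spec_extract_page_line_separators (text : String) (out : List (Int × String)) : Prop := out = extract_page_line_separators_alt text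
instance (text : String) (out : List (Int × String)) : Decidable (Spec_extract_page_line_separators text out) := by unfold Spec_extract_page_line_separators; infer_instance

-- ===== CLAIM (what is proved, stated in full; the proofs are below) =====
def Claim_equal_extract_page_line_separators : Prop := ∀ (text : String), Dom_extract_page_line_separators text → Spec_extract_page_line_separators text (extract_page_line_separators text)

-- ===== LEMMAS AND PROOFS =====

theorem pv_loop_eq (l : List Char) : ∀ (acc : List (Int × String)) (i k : Int),
    (l.foldl
      (fun st c =>
        if c == 'p' || c == '\n' then (st.1 ++ [(st.2, String.ofList [c])], st.2)
        else (st.1, st.2 + 1))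
      (acc, i - k)).1
      = acc ++ (PySem.List.enumerate
          ((PySem.List.enumerate l i).filter (fun ic => ic.2 == 'p' || ic.2 == '\n')) k).map
            (fun ki => (ki.2.1 - ki.1, String.ofList [ki.2.2])) := by
  induction l with
  | nil => intro acc i k; simp [PySem.List.enumerate_nil]
  | cons c cs ih =>
    intro acc i k
    by_cases h : (c == 'p' || c == '\n') = true
    · have h1 : i - k = (i + 1) - (k + 1) := by ring
      simp only [List.foldl_cons, h, if_true, PySem.List.enumerate_cons, List.filter_cons, h1]
      rw [ih (acc ++ [((i + 1) - (k + 1), String.ofList [c])]) (i + 1) (k + 1)]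
      simp
    · have h1 : i - k + 1 = (i + 1) - k := by ring
      simp only [List.foldl_cons, h, Bool.false_eq_true, if_false, PySem.List.enumerate_cons,
        List.filter_cons, h1]
      exact ih acc (i + 1) k

theorem extract_page_line_separators_spec : Claim_equal_extract_page_line_separators := by
  intro text _
  unfold Spec_extract_page_line_separators extract_page_line_separators extract_page_line_separators_alt
  by_cases h : text = ""
  · simp [h]
  · simp only [h, reduceIte]
    have := pv_loop_eq (PySem.Str.replace text "b\n" "").toList [] 0 0
    simpa using this
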